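-- pv_equiv track=rewrite | github.com/localboy/python-problem-solving | power_sum.py | count_power_numbers
-- ===== SOURCE A (Python) =====
-- def count_power_numbers(start, end):
--
--     # Initializing all number False as a power Number
--     a = [False]*(end+1)
--
--     counter = 0
--     power_numbers = []
--     a[1] = True # 1 Can always be represented as a power number
--
--     # Generating all power number
--     for i in range(2, end):
--
--         if pow(i, 2) >= end:
--             break
--
--         for j in range(2, end):
--             if pow(i,j) >= end:
--                 break
--
--             t = pow(i, j)
--             a[t] = True
--
--     for i in range(start, end):
--
--         # a power number can be represented as sum of two another power numbers
--         # eg. 25 = 5^2 + 0^2.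
--         if a[i]:
--             power_numbers.append(i)
--             counter +=1
--         else:
--             for j in reversed(range(0, i-1)):
--
--                 # Checking if two power numbers form the required number
--                 if (a[j] and a[i-j]):
--                     # Checking for duplicate
--                     if i not in power_numbers:
--                         power_numbers.append(i)
--                         counter +=1
--
--     return counter
-- ===== SOURCE B (Python) =====
-- def count_power_numbers(start, end):
--     # Build the set of "power numbers" ({1} plus all perfect powers below end)
--     # by multiplicative accumulation, then precompute all representable sums
--     # p+q (q a real power >= 2) once, and count by membership lookup.
--     powers = {1}
--     b = 2
--     while b * b < end:
--         p = b * b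
--         while p < end:
--             powers.add(p)
--             p *= b
--         b += 1
--     rep = set(powers)
--     for p in powers:
--         for q in powers:
--             if q >= 2 and p + q < end:
--                 rep.add(p + q)
--     return sum(1 for v in range(start, end) if v in rep)
-- ===== Notes on version B (the rewrite author's own statement) =====
-- stated objective: alternative
-- what changed: B builds the power-number set by multiplicative accumulation and precomputes the sumset {p+q : p,q powers, q>=2} once, then counts range members by set lookup, instead of A's per-number backward scan over the whole boolean array for a two-power decomposition.
-- intended difference: For start < 0 (with end >= 1, start >= -(end+1)) whose wrapped window contains 1 or a perfect power below end, A's negative-index reads a[i] wrap to the top of the array and accidentally count those negative i as power sums (A returns a larger count), while B counts no negative number, which is the intended meaning of counting in range(start, end). — e.g. on count_power_numbers(-2, 5): A returns 3, B returns 2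
import Mathlib
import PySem

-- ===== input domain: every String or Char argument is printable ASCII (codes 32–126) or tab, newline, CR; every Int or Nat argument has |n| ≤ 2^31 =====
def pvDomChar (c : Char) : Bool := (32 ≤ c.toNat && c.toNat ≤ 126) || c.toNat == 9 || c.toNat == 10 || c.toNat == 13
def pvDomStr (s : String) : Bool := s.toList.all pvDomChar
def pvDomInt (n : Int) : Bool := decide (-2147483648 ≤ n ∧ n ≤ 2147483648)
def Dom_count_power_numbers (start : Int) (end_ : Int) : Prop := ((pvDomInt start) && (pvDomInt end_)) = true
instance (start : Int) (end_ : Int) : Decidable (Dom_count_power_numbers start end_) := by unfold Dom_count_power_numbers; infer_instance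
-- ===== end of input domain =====

-- B precomputes the power-number set and its pairwise sumset once and counts range members
-- by set membership, instead of A's per-number backward scan for a two-power decomposition.

-- ===== PORT A =====

-- a[j] (and a[i], a[i-j]) read with Python index semantics (a negative index counts from the
-- end); inside Pre_ every read is in range, so the getD default is never the result.
def pvAget (a : Array Bool) (i : Int) : Bool :=
  if 0 ≤ i then a.getD i.toNat false
  else a.getD ((a.size : Int) + i).toNat false

-- inner generation loop: for j in range(2, end): if pow(i,j) >= end: break; a[pow(i,j)] = True
def pvGenJ (end_ : Int) (i : Int) (a : Array Bool) (j : Int) : Nat → Array Bool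
  | 0 => a
  | f + 1 =>
    if end_ ≤ i ^ j.toNat then a
    else pvGenJ end_ i (a.setIfInBounds (i ^ j.toNat).toNat true) (j + 1) f

-- outer generation loop: for i in range(2, end): if pow(i,2) >= end: break; <inner loop>
def pvGenI (end_ : Int) (a : Array Bool) (i : Int) : Nat → Array Bool
  | 0 => a
  | f + 1 =>
    if end_ ≤ i ^ 2 then a
    else pvGenI end_ (pvGenJ end_ i a 2 (end_ - 2).toNat) (i + 1) f

-- for j in reversed(range(0, i-1)): if a[j] and a[i-j]: if i not in power_numbers: append, counter += 1
def pvScanJ (a : Array Bool) (i : Int) (j : Int) (pn : List Int) (cnt : Int) : Nat → List Int × Int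
  | 0 => (pn, cnt)
  | f + 1 =>
    if pvAget a j && pvAget a (i - j) then
      if i ∈ pn then pvScanJ a i (j - 1) pn cnt f
      else pvScanJ a i (j - 1) (pn ++ [i]) (cnt + 1) f
    else pvScanJ a i (j - 1) pn cnt f

-- for i in range(start, end): if a[i]: append, counter += 1  else: <inner scan>
def pvCount (a : Array Bool) (i : Int) (pn : List Int) (cnt : Int) : Nat → Int
  | 0 => cnt
  | f + 1 =>
    if pvAget a i then pvCount a (i + 1) (pn ++ [i]) (cnt + 1) f
    else
      let r := pvScanJ a i (i - 2) pn cnt (i - 1).toNat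
      pvCount a (i + 1) r.1 r.2 f

def count_power_numbers (start : Int) (end_ : Int) : Int :=
  let a0 := (Array.replicate (end_ + 1).toNat false).setIfInBounds 1 true
  let a := pvGenI end_ a0 2 (end_ - 2).toNat
  pvCount a start [] 0 (end_ - start).toNat

-- ===== PORT B =====

-- while p < end: powers.add(p); p *= b
def pvPowB (end_ : Int) (b : Int) (p : Int) (s : PySem.Set Int) : Nat → PySem.Set Int
  | 0 => s
  | f + 1 => if p < end_ then pvPowB end_ b (p * b) (s.add p) f else s

-- while b*b < end: <inner loop from p = b*b>; b += 1
def pvPowers (end_ : Int) (b : Int) (s : PySem.Set Int) : Nat → PySem.Set Int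
  | 0 => s
  | f + 1 =>
    if b * b < end_ then pvPowers end_ (b + 1) (pvPowB end_ b (b * b) s end_.toNat) f
    else s

-- rep = set(powers); for p in powers: for q in powers: if q >= 2 and p+q < end: rep.add(p+q)
def pvRep (end_ : Int) (powers : PySem.Set Int) : PySem.Set Int :=
  powers.foldl
    (fun r p => powers.foldl
      (fun r q => if 2 ≤ q ∧ p + q < end_ then PySem.Set.add r (p + q) else r) r)
    (PySem.Set.ofList powers)

def count_power_numbers_alt (start : Int) (end_ : Int) : Int :=
  let powers := pvPowers end_ 2 (PySem.Set.ofList [1]) end_.toNat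
  let rep := pvRep end_ powers
  (PySem.List.pyRange start end_ 1).foldl (fun c v => if v ∈ rep then c + 1 else c) 0

-- ===== PRECONDITION & SPEC =====

-- Pre_ excludes exactly the inputs where A raises IndexError: end <= 0 (a[1] on a too-short
-- list) and start < -(end+1) (a[i] below the wraparound range).
def Pre_count_power_numbers (start : Int) (end_ : Int) : Prop :=
  1 ≤ end_ ∧ -(end_ + 1) ≤ start

instance (start : Int) (end_ : Int) : Decidable (Pre_count_power_numbers start end_) := by
  unfold Pre_count_power_numbers; infer_instance

def pvWitness_count_power_numbers : Int × Int := (0, 10)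

-- For start < 0, A's reads a[i] wrap around to the top of the power array and A accidentally
-- counts each negative i whose wrapped cell end+1+i holds a power number (or 1), while B counts
-- no negative number as a sum of powers, which is the intended meaning of the range count.
def D_count_power_numbers (start : Int) (end_ : Int) : Prop :=
  1 ≤ end_ ∧ -(end_ + 1) ≤ start ∧ start < 0 ∧
    (end_ + 1 + start ≤ 1 ∨
      ∃ c ∈ PySem.List.pyRange 2 (min end_ 46342) 1, ∃ e ∈ List.range 32,
        2 ≤ e ∧ end_ + 1 + start ≤ c ^ e ∧ c ^ e < end_)

instance (start : Int) (end_ : Int) : Decidable (D_count_power_numbers start end_) := by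
  unfold D_count_power_numbers; infer_instance

def Spec_count_power_numbers (start : Int) (end_ : Int) (out : Int) : Prop :=
  ¬ D_count_power_numbers start end_ → out = count_power_numbers_alt start end_
instance (start : Int) (end_ : Int) (out : Int) : Decidable (Spec_count_power_numbers start end_ out) := by
  unfold Spec_count_power_numbers; infer_instance

def pvDiffWitness_count_power_numbers : Int × Int := (-2, 5)
def pvDiffWitnessOut_count_power_numbers : Int × Int := (3, 2)

-- ===== CLAIM (what is proved, stated in full; the proofs are below) =====
def Claim_unchanged_count_power_numbers : Prop := ∀ (start : Int) (end_ : Int), Dom_count_power_numbers start end_ → Pre_count_power_numbers start end_ → Spec_count_power_numbers start end_ (count_power_numbers start end_)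
def Claim_changed_count_power_numbers : Prop := Dom_count_power_numbers (pvDiffWitness_count_power_numbers.1) (pvDiffWitness_count_power_numbers.2) ∧ Pre_count_power_numbers (pvDiffWitness_count_power_numbers.1) (pvDiffWitness_count_power_numbers.2) ∧ D_count_power_numbers (pvDiffWitness_count_power_numbers.1) (pvDiffWitness_count_power_numbers.2) ∧ count_power_numbers (pvDiffWitness_count_power_numbers.1) (pvDiffWitness_count_power_numbers.2) = pvDiffWitnessOut_count_power_numbers.1 ∧ count_power_numbers_alt (pvDiffWitness_count_power_numbers.1) (pvDiffWitness_count_power_numbers.2) = pvDiffWitnessOut_count_power_numbers.2 ∧ pvDiffWitnessOut_count_power_numbers.1 ≠ pvDiffWitnessOut_count_power_numbers.2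

def Claim_exact_count_power_numbers : Prop := ∀ (start : Int) (end_ : Int), Dom_count_power_numbers start end_ → Pre_count_power_numbers start end_ → D_count_power_numbers start end_ → count_power_numbers start end_ ≠ count_power_numbers_alt start end_

-- ===== LEMMAS AND PROOFS =====


-- the set of "power numbers" A's array marks true and B's `powers` set holds
def pvS (end_ m : Int) : Prop :=
  m = 1 ∨ ∃ c : Int, ∃ e : Nat, 2 ≤ c ∧ 2 ≤ e ∧ c ^ e = m ∧ m < end_

-- the two reachable loop-free counting recurrences the loops of A and B reduce to
def pvQb (a : Array Bool) (i : Int) : Bool :=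
  pvAget a i || (PySem.List.pyRange 0 (i - 1) 1).any (fun t => pvAget a t && pvAget a (i - t))

def pvN (a : Array Bool) (i : Int) : Nat → Int
  | 0 => 0
  | f + 1 => (if pvQb a i then 1 else 0) + pvN a (i + 1) f

def pvM (rep : List Int) (i : Int) : Nat → Int
  | 0 => 0
  | f + 1 => (if i ∈ rep then 1 else 0) + pvM rep (i + 1) f

def pvArr (end_ : Int) : Array Bool :=
  pvGenI end_ ((Array.replicate (end_ + 1).toNat false).setIfInBounds 1 true) 2 (end_ - 2).toNat

-- ---- generation-side characterisation (A) ----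

theorem pvGenJ_size (end_ i : Int) : ∀ (f : Nat) (a : Array Bool) (j : Int),
    (pvGenJ end_ i a j f).size = a.size := by
  intro f
  induction f with
  | zero => intro a j; rfl
  | succ f ih =>
    intro a j
    rw [pvGenJ]
    split
    · rfl
    · rw [ih]; simp

theorem pvGenI_size (end_ : Int) : ∀ (f : Nat) (a : Array Bool) (i : Int),
    (pvGenI end_ a i f).size = a.size := by
  intro f
  induction f with
  | zero => intro a i; rfl
  | succ f ih =>
    intro a i
    rw [pvGenI]
    split
    · rfl
    · rw [ih, pvGenJ_size]

theorem pvGenJ_true (end_ i : Int) (hi : 2 ≤ i) :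
    ∀ (f : Nat) (a : Array Bool) (j : Int) (hj : 2 ≤ j) (hw : end_.toNat ≤ a.size) (k : Nat),
    ((pvGenJ end_ i a j f)[k]? = some true ↔
      (a[k]? = some true ∨ ∃ e : Nat, j.toNat ≤ e ∧ e < j.toNat + f ∧ i ^ e < end_ ∧ (i ^ e).toNat = k)) := by
  intro f
  induction f with
  | zero =>
    intro a j _ _ k
    constructor
    · exact Or.inl
    · rintro (h | ⟨e, he1, he2, _⟩)
      · exact h
      · omega
  | succ f ih =>
    intro a j _hj hw k
    rw [pvGenJ]
    by_cases hbr : end_ ≤ i ^ j.toNat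
    · rw [if_pos hbr]
      constructor
      · exact Or.inl
      · rintro (h | ⟨e, he1, _, helt, _⟩)
        · exact h
        · exact absurd helt (not_lt.mpr (le_trans hbr (pow_le_pow_right₀ (by omega) he1)))
    · rw [if_neg hbr]
      have hnlt : i ^ j.toNat < end_ := not_le.mp hbr
      have hpos : 0 ≤ i ^ j.toNat := pow_nonneg (by omega) _
      have hn : (i ^ j.toNat).toNat < a.size := by omega
      rw [ih (a.setIfInBounds (i ^ j.toNat).toNat true) (j + 1) (by omega)
        (by rw [Array.size_setIfInBounds]; exact hw) k]
      have hset : (a.setIfInBounds (i ^ j.toNat).toNat true)[k]? =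
          if (i ^ j.toNat).toNat = k then some true else a[k]? := by
        rw [Array.getElem?_setIfInBounds]
        split <;> simp_all
      rw [hset]
      have hj1 : (j + 1).toNat = j.toNat + 1 := by omega
      rw [hj1]
      constructor
      · rintro (h | ⟨e, he1, he2, helt, hek⟩)
        · by_cases hnk : (i ^ j.toNat).toNat = k
          · exact Or.inr ⟨j.toNat, le_rfl, by omega, hnlt, hnk⟩
          · rw [if_neg hnk] at h
            exact Or.inl h
        · exact Or.inr ⟨e, by omega, by omega, helt, hek⟩
      · rintro (h | ⟨e, he1, he2, helt, hek⟩)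
        · by_cases hnk : (i ^ j.toNat).toNat = k
          · left; rw [if_pos hnk]
          · left; rw [if_neg hnk]; exact h
        · by_cases hej : e = j.toNat
          · subst hej
            left
            rw [if_pos hek]
          · exact Or.inr ⟨e, by omega, by omega, helt, hek⟩

theorem pvGenI_true (end_ : Int) :
    ∀ (f : Nat) (a : Array Bool) (i : Int) (hi : 2 ≤ i) (hw : end_.toNat ≤ a.size) (k : Nat),
    ((pvGenI end_ a i f)[k]? = some true ↔
      (a[k]? = some true ∨ ∃ c : Int, i ≤ c ∧ c < i + f ∧ c * c < end_ ∧
        ∃ e : Nat, 2 ≤ e ∧ c ^ e < end_ ∧ (c ^ e).toNat = k)) := by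
  intro f
  induction f with
  | zero =>
    intro a i _ _ k
    constructor
    · exact Or.inl
    · rintro (h | ⟨c, hc1, hc2, _⟩)
      · exact h
      · push_cast at hc2; omega
  | succ f ih =>
    intro a i hi hw k
    rw [pvGenI]
    by_cases hbr : end_ ≤ i ^ 2
    · rw [if_pos hbr]
      rw [pow_two] at hbr
      constructor
      · exact Or.inl
      · rintro (h | ⟨c, hc1, _, hcc, _⟩)
        · exact h
        · exfalso
          have hmono : i * i ≤ c * c := mul_le_mul hc1 hc1 (by omega) (by omega)
          linarith
    · rw [if_neg hbr]
      have hii : i * i < end_ := by rw [← pow_two]; exact not_le.mp hbr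
      rw [ih (pvGenJ end_ i a 2 (end_ - 2).toNat) (i + 1) (by omega)
        (by rw [pvGenJ_size]; exact hw) k]
      rw [pvGenJ_true end_ i hi ((end_ - 2).toNat) a 2 (by omega) hw k]
      simp only [show (2 : Int).toNat = 2 from rfl]
      constructor
      · rintro ((h | ⟨e, he1, he2, helt, hek⟩) | ⟨c, hc1, hc2, hcc, e, he, helt, hek⟩)
        · exact Or.inl h
        · exact Or.inr ⟨i, le_rfl, by push_cast; omega, hii, e, he1, helt, hek⟩
        · exact Or.inr ⟨c, by omega, by push_cast at hc2 ⊢; omega, hcc, e, he, helt, hek⟩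
      · rintro (h | ⟨c, hc1, hc2, hcc, e, he, helt, hek⟩)
        · exact Or.inl (Or.inl h)
        · by_cases hci : c = i
          · subst hci
            left; right
            have h2e : ((e : Int)) < 2 ^ e := by exact_mod_cast Nat.lt_two_pow_self
            have hle : (2 : Int) ^ e ≤ c ^ e := pow_le_pow_left₀ (by omega) (by omega) e
            have hee : (e : Int) < end_ := by
              calc ((e : Int)) < 2 ^ e := h2e
              _ ≤ c ^ e := hle
              _ < end_ := helt
            exact ⟨e, he, by omega, helt, hek⟩
          · exact Or.inr ⟨c, by omega, by push_cast at hc2 ⊢; omega, hcc, e, he, helt, hek⟩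

theorem pvArr_size (end_ : Int) : (pvArr end_).size = (end_ + 1).toNat := by
  unfold pvArr
  rw [pvGenI_size, Array.size_setIfInBounds, Array.size_replicate]

theorem pvArr_true (end_ : Int) (h1 : 1 ≤ end_) (k : Nat) :
    (pvArr end_)[k]? = some true ↔ ((k : Int) ≤ end_ ∧ pvS end_ (k : Int)) := by
  have hLlen : ((Array.replicate (end_ + 1).toNat false).setIfInBounds 1 true).size = (end_ + 1).toNat := by
    rw [Array.size_setIfInBounds, Array.size_replicate]
  unfold pvArr
  rw [pvGenI_true end_ ((end_ - 2).toNat) _ 2 (by omega) (by rw [hLlen]; omega) k]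
  have ha0 : ((Array.replicate (end_ + 1).toNat false).setIfInBounds 1 true)[k]? = some true ↔ k = 1 := by
    have hset : ((Array.replicate (end_ + 1).toNat false).setIfInBounds 1 true)[k]? =
        if 1 = k then some true else (Array.replicate (end_ + 1).toNat false)[k]? := by
      rw [Array.getElem?_setIfInBounds]
      split <;> simp_all
      omega
    rw [hset]
    by_cases hk : (1 : Nat) = k
    · subst hk
      simp
    · rw [if_neg hk]
      constructor
      · intro h
        exfalso
        by_cases hkl : k < (end_ + 1).toNat
        · rw [Array.getElem?_eq_getElem (by simpa using hkl)] at h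
          simp at h
        · rw [Array.getElem?_eq_none (by simpa using hkl)] at h
          simp at h
      · intro h; exact absurd h.symm hk
  rw [ha0]
  constructor
  · rintro (rfl | ⟨c, hc1, hc2, hcc, e, he, helt, hek⟩)
    · exact ⟨by push_cast; omega, Or.inl (by norm_num)⟩
    · have hpos : 0 ≤ c ^ e := pow_nonneg (by omega) e
      have hck : (k : Int) = c ^ e := by omega
      exact ⟨by omega, Or.inr ⟨c, e, hc1, he, hck.symm, by omega⟩⟩
  · rintro ⟨hk, hS⟩
    rcases hS with h1k | ⟨c, e, hc, he, hck, hlt⟩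
    · left; omega
    · right
      have helt : c ^ e < end_ := by rw [hck]; exact hlt
      have hcc : c * c < end_ := by
        have h2 : c * c ≤ c ^ e := by
          calc c * c = c ^ 2 := (sq c).symm
          _ ≤ c ^ e := pow_le_pow_right₀ (by omega) he
        omega
      have hcend : c < end_ := by nlinarith
      refine ⟨c, hc, by omega, hcc, e, he, helt, by rw [hck]; exact Int.toNat_natCast k⟩

theorem pvAget_arr (end_ : Int) (h1 : 1 ≤ end_) (v : Int)
    (hlo : -(end_ + 1) ≤ v) (hhi : v < end_) :
    (pvAget (pvArr end_) v = true ↔ pvS end_ (if v < 0 then end_ + 1 + v else v)) := by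
  have hlen : (pvArr end_).size = (end_ + 1).toNat := pvArr_size end_
  by_cases hv : v < 0
  · rw [if_pos hv]
    unfold pvAget
    rw [if_neg (by omega), Array.getD_eq_getD_getElem?]
    obtain ⟨x, hx⟩ : ∃ x, (pvArr end_)[(((pvArr end_).size : Int) + v).toNat]? = some x :=
      ⟨_, Array.getElem?_eq_getElem (by omega)⟩
    have hchar := pvArr_true end_ h1 ((((pvArr end_).size : Int) + v).toNat)
    rw [hx] at hchar ⊢
    have hwk : (((((pvArr end_).size : Int) + v).toNat : Nat) : Int) = end_ + 1 + v := by
      omega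
    rw [hwk] at hchar
    simp only [Option.getD_some]
    constructor
    · intro hxx
      exact (hchar.mp (by rw [hxx])).2
    · intro hS
      simpa using hchar.mpr ⟨by omega, hS⟩
  · rw [if_neg hv]
    unfold pvAget
    rw [if_pos (by omega), Array.getD_eq_getD_getElem?]
    obtain ⟨x, hx⟩ : ∃ x, (pvArr end_)[v.toNat]? = some x :=
      ⟨_, Array.getElem?_eq_getElem (by omega)⟩
    have hchar := pvArr_true end_ h1 v.toNat
    rw [hx] at hchar ⊢
    have hcast : ((v.toNat : Nat) : Int) = v := by omega
    rw [hcast] at hchar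
    simp only [Option.getD_some]
    constructor
    · intro hxx
      exact (hchar.mp (by rw [hxx])).2
    · intro hS
      simpa using hchar.mpr ⟨by omega, hS⟩

-- ---- counting-side closed form (A) ----

theorem pvScanJ_mem (a : Array Bool) (i : Int) :
    ∀ (f : Nat) (j : Int) (pn : List Int) (cnt : Int), i ∈ pn →
    pvScanJ a i j pn cnt f = (pn, cnt) := by
  intro f
  induction f with
  | zero => intro j pn cnt _; rfl
  | succ f ih =>
    intro j pn cnt h
    rw [pvScanJ]
    split
    all_goals exact ih _ _ _ h

theorem pvScanJ_not_mem (a : Array Bool) (i : Int) :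
    ∀ (f : Nat) (j : Int) (pn : List Int) (cnt : Int), i ∉ pn →
    pvScanJ a i j pn cnt f =
      if (PySem.List.pyRange (j - f + 1) (j + 1) 1).any
          (fun t => pvAget a t && pvAget a (i - t)) = true
      then (pn ++ [i], cnt + 1) else (pn, cnt) := by
  intro f
  induction f with
  | zero =>
    intro j pn cnt _
    have hr : PySem.List.pyRange (j - 0 + 1) (j + 1) 1 = [] := by
      rw [PySem.List.pyRange_one]
      have : (j + 1 - (j - 0 + 1)).toNat = 0 := by omega
      rw [this]; rfl
    simp only [Nat.cast_zero]
    rw [hr]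
    simp [pvScanJ]
  | succ f ih =>
    intro j pn cnt h
    have hsplit : PySem.List.pyRange (j - (f + 1 : Nat) + 1) (j + 1) 1 =
        PySem.List.pyRange (j - (f + 1 : Nat) + 1) j 1 ++ [j] := by
      have := PySem.List.pyRange_one_succ_right (a := j - (f + 1 : Nat) + 1) (b := j) (by push_cast; omega)
      simpa using this
    have hlow : j - (f + 1 : Nat) + 1 = (j - 1) - (f : Nat) + 1 := by push_cast; ring
    rw [pvScanJ]
    by_cases hg : (pvAget a j && pvAget a (i - j)) = true
    · rw [if_pos hg, if_neg h]
      rw [pvScanJ_mem a i f (j - 1) (pn ++ [i]) (cnt + 1) (by simp)]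
      have hany : (PySem.List.pyRange (j - (f + 1 : Nat) + 1) (j + 1) 1).any
          (fun t => pvAget a t && pvAget a (i - t)) = true := by
        apply List.any_eq_true.mpr
        refine ⟨j, ?_, hg⟩
        rw [PySem.List.mem_pyRange_one]
        push_cast
        omega
      rw [if_pos hany]
    · rw [if_neg hg]
      rw [ih (j - 1) pn cnt h, hsplit, hlow]
      rw [List.any_append]
      rw [show j - 1 + 1 = j from by ring]
      have hg' : (pvAget a j && pvAget a (i - j)) = false := by simpa using hg
      simp only [List.any_cons, List.any_nil, hg', Bool.or_false]


theorem pvCount_eq_pvN (a : Array Bool) :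
    ∀ (f : Nat) (i : Int) (pn : List Int) (cnt : Int), (∀ x ∈ pn, x < i) →
    pvCount a i pn cnt f = cnt + pvN a i f := by
  intro f
  induction f with
  | zero => intro i pn cnt _; simp [pvCount, pvN]
  | succ f ih =>
    intro i pn cnt hinv
    rw [pvCount, pvN]
    by_cases hg : pvAget a i = true
    · rw [if_pos hg]
      rw [ih (i + 1) (pn ++ [i]) (cnt + 1) ?inv]
      case inv =>
        intro x hx
        rcases List.mem_append.mp hx with hx | hx
        · have := hinv x hx; omega
        · simp at hx; omega
      have hq : pvQb a i = true := by simp [pvQb, hg]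
      rw [if_pos hq]; ring
    · rw [if_neg hg]
      have hge : pvAget a i = false := by simpa using hg
      have hnm : i ∉ pn := fun hmem => absurd (hinv i hmem) (lt_irrefl i)
      show pvCount a (i + 1) (pvScanJ a i (i - 2) pn cnt (i - 1).toNat).1
            (pvScanJ a i (i - 2) pn cnt (i - 1).toNat).2 f = _
      rw [pvScanJ_not_mem a i ((i - 1).toNat) (i - 2) pn cnt hnm]
      have hcond : ((PySem.List.pyRange (i - 2 - ((i - 1).toNat : Int) + 1) (i - 2 + 1) 1).any
            fun t => pvAget a t && pvAget a (i - t)) =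
          ((PySem.List.pyRange 0 (i - 1) 1).any fun t => pvAget a t && pvAget a (i - t)) := by
        by_cases hi : 1 ≤ i
        · rw [show i - 2 - ((i - 1).toNat : Int) + 1 = 0 from by omega,
            show i - 2 + 1 = i - 1 from by ring]
        · have e1 : PySem.List.pyRange (i - 2 - ((i - 1).toNat : Int) + 1) (i - 2 + 1) 1 = [] := by
            rw [PySem.List.pyRange_one,
              show (i - 2 + 1 - (i - 2 - ((i - 1).toNat : Int) + 1)).toNat = 0 from by omega]
            rfl
          have e2 : PySem.List.pyRange 0 (i - 1) 1 = [] := by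
            rw [PySem.List.pyRange_one, show (i - 1 - 0).toNat = 0 from by omega]
            rfl
          rw [e1, e2]
      rw [hcond]
      by_cases hA : ((PySem.List.pyRange 0 (i - 1) 1).any
          fun t => pvAget a t && pvAget a (i - t)) = true
      · rw [if_pos hA]
        show pvCount a (i + 1) (pn ++ [i]) (cnt + 1) f = _
        rw [ih (i + 1) (pn ++ [i]) (cnt + 1) ?inv2]
        case inv2 =>
          intro x hx
          rcases List.mem_append.mp hx with hx | hx
          · have := hinv x hx; omega
          · simp at hx; omega
        have hq : pvQb a i = true := by simp [pvQb, hge, hA]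
        rw [if_pos hq]; ring
      · rw [if_neg hA]
        show pvCount a (i + 1) pn cnt f = _
        rw [ih (i + 1) pn cnt (fun x hx => by have := hinv x hx; omega)]
        have hq : pvQb a i = false := by
          simp only [pvQb, hge, Bool.false_or]
          simpa using hA
        rw [if_neg (by simp [hq])]
        ring

-- ---- power-set characterisation (B) ----

theorem pvPowB_mem (end_ b : Int) (hb : 2 ≤ b) :
    ∀ (f : Nat) (p : Int) (hp : 1 ≤ p) (s : PySem.Set Int) (x : Int),
    (x ∈ pvPowB end_ b p s f ↔ x ∈ s ∨ ∃ t : Nat, t < f ∧ x = p * b ^ t ∧ x < end_) := by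
  intro f
  induction f with
  | zero =>
    intro p _ s x
    constructor
    · exact Or.inl
    · rintro (h | ⟨t, ht, _⟩)
      · exact h
      · omega
  | succ f ih =>
    intro p hp s x
    rw [pvPowB]
    by_cases hpe : p < end_
    · rw [if_pos hpe]
      rw [ih (p * b) (by nlinarith) (PySem.Set.add s p) x]
      rw [PySem.Set.mem_add]
      constructor
      · rintro ((h | rfl) | ⟨t, ht, rfl, hxe⟩)
        · exact Or.inl h
        · exact Or.inr ⟨0, by omega, by simp, hpe⟩
        · exact Or.inr ⟨t + 1, by omega, by rw [pow_succ]; ring, hxe⟩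
      · rintro (h | ⟨t, ht, rfl, hxe⟩)
        · exact Or.inl (Or.inl h)
        · cases t with
          | zero => left; right; simp
          | succ t => right; exact ⟨t, by omega, by rw [pow_succ]; ring, hxe⟩
    · rw [if_neg hpe]
      constructor
      · exact Or.inl
      · rintro (h | ⟨t, ht, rfl, hxe⟩)
        · exact h
        · exfalso
          have : p ≤ p * b ^ t := le_mul_of_one_le_right (by omega) (one_le_pow₀ (by omega))
          omega

theorem pvPowers_mem_aux (end_ : Int) :
    ∀ (f : Nat) (b : Int) (hb : 2 ≤ b) (s : PySem.Set Int) (x : Int),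
    (x ∈ pvPowers end_ b s f ↔ x ∈ s ∨ ∃ c : Int, b ≤ c ∧ c < b + f ∧ c * c < end_ ∧
      ∃ e : Nat, 2 ≤ e ∧ x = c ^ e ∧ x < end_) := by
  intro f
  induction f with
  | zero =>
    intro b _ s x
    constructor
    · exact Or.inl
    · rintro (h | ⟨c, hc1, hc2, _⟩)
      · exact h
      · push_cast at hc2; omega
  | succ f ih =>
    intro b hb s x
    rw [pvPowers]
    by_cases hbb : b * b < end_
    · rw [if_pos hbb]
      rw [ih (b + 1) (by omega) _ x]
      rw [pvPowB_mem end_ b hb end_.toNat (b * b) (by nlinarith) s x]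
      constructor
      · rintro ((h | ⟨t, _, rfl, hxe⟩) | ⟨c, hc1, hc2, hcc, e, he, rfl, hxe⟩)
        · exact Or.inl h
        · refine Or.inr ⟨b, le_rfl, by push_cast; omega, hbb, t + 2, by omega, ?_, hxe⟩
          rw [pow_add, pow_two]; ring
        · exact Or.inr ⟨c, by omega, by push_cast at hc2 ⊢; omega, hcc, e, he, rfl, hxe⟩
      · rintro (h | ⟨c, hc1, hc2, hcc, e, he, rfl, hxe⟩)
        · exact Or.inl (Or.inl h)
        · by_cases hcb : c = b
          · subst hcb
            left; right
            have h2e : ((e : Int)) < 2 ^ e := by exact_mod_cast Nat.lt_two_pow_self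
            have hle : (2 : Int) ^ e ≤ c ^ e := pow_le_pow_left₀ (by omega) hb e
            have hee : (e : Int) < end_ := by
              calc ((e : Int)) < 2 ^ e := h2e
              _ ≤ c ^ e := hle
              _ < end_ := hxe
            refine ⟨e - 2, by omega, ?_, hxe⟩
            rw [← pow_two, ← pow_add, show 2 + (e - 2) = e from by omega]
          · refine Or.inr ⟨c, by omega, by push_cast at hc2 ⊢; omega, hcc, e, he, rfl, hxe⟩
    · rw [if_neg hbb]
      constructor
      · exact Or.inl
      · rintro (h | ⟨c, hc1, _, hcc, _⟩)
        · exact h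
        · exfalso; nlinarith

theorem pvPowers_char (end_ : Int) (h1 : 1 ≤ end_) (x : Int) :
    (x ∈ pvPowers end_ 2 (PySem.Set.ofList [1]) end_.toNat ↔ pvS end_ x) := by
  rw [pvPowers_mem_aux end_ end_.toNat 2 (by omega) _ x]
  rw [PySem.Set.mem_ofList, List.mem_singleton]
  constructor
  · rintro (rfl | ⟨c, hc1, _, _, e, he, rfl, hxe⟩)
    · exact Or.inl rfl
    · exact Or.inr ⟨c, e, hc1, he, rfl, hxe⟩
  · rintro (rfl | ⟨c, e, hc, he, rfl, hxe⟩)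
    · exact Or.inl rfl
    · right
      have hcc : c * c < end_ := by
        have h2 : c * c ≤ c ^ e := by
          calc c * c = c ^ 2 := (sq c).symm
          _ ≤ c ^ e := pow_le_pow_right₀ (by omega) he
        omega
      have hcend : c < end_ := by nlinarith
      exact ⟨c, hc, by omega, hcc, e, he, rfl, hxe⟩

theorem pv_mem_foldl_addIf (P : Int → Prop) [DecidablePred P] (g : Int → Int) :
    ∀ (l : List Int) (r : PySem.Set Int) (y : Int),
    (y ∈ l.foldl (fun r q => if P q then PySem.Set.add r (g q) else r) r ↔
      y ∈ r ∨ ∃ q ∈ l, P q ∧ y = g q) := by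
  intro l
  induction l with
  | nil => intro r y; simp
  | cons q l ih =>
    intro r y
    rw [List.foldl_cons, ih]
    by_cases hq : P q
    · rw [if_pos hq, PySem.Set.mem_add]
      constructor
      · rintro ((h | rfl) | h)
        · exact Or.inl h
        · exact Or.inr ⟨q, by simp, hq, rfl⟩
        · obtain ⟨q', hq', hPq', rfl⟩ := h
          exact Or.inr ⟨q', by simp [hq'], hPq', rfl⟩
      · rintro (h | ⟨q', hq', hPq', rfl⟩)
        · exact Or.inl (Or.inl h)
        · rcases List.mem_cons.mp hq' with rfl | hmem
          · exact Or.inl (Or.inr rfl)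
          · exact Or.inr ⟨q', hmem, hPq', rfl⟩
    · rw [if_neg hq]
      constructor
      · rintro (h | ⟨q', hq', hPq', rfl⟩)
        · exact Or.inl h
        · exact Or.inr ⟨q', by simp [hq'], hPq', rfl⟩
      · rintro (h | ⟨q', hq', hPq', rfl⟩)
        · exact Or.inl h
        · rcases List.mem_cons.mp hq' with rfl | hmem
          · exact absurd hPq' hq
          · exact Or.inr ⟨q', hmem, hPq', rfl⟩

theorem pvRep_mem_aux (end_ : Int) (powers : List Int) :
    ∀ (l : List Int) (r : PySem.Set Int) (y : Int),
    (y ∈ l.foldl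
        (fun r p => powers.foldl
          (fun r q => if 2 ≤ q ∧ p + q < end_ then PySem.Set.add r (p + q) else r) r) r ↔
      y ∈ r ∨ ∃ p ∈ l, ∃ q ∈ powers, (2 ≤ q ∧ p + q < end_) ∧ y = p + q) := by
  intro l
  induction l with
  | nil => intro r y; simp
  | cons p l ih =>
    intro r y
    rw [List.foldl_cons, ih, pv_mem_foldl_addIf (fun q => 2 ≤ q ∧ p + q < end_) (fun q => p + q)]
    constructor
    · rintro ((h | ⟨q, hq, hP, rfl⟩) | ⟨p', hp', q, hq, hP, rfl⟩)
      · exact Or.inl h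
      · exact Or.inr ⟨p, by simp, q, hq, hP, rfl⟩
      · exact Or.inr ⟨p', by simp [hp'], q, hq, hP, rfl⟩
    · rintro (h | ⟨p', hp', q, hq, hP, rfl⟩)
      · exact Or.inl (Or.inl h)
      · rcases List.mem_cons.mp hp' with rfl | hmem
        · exact Or.inl (Or.inr ⟨q, hq, hP, rfl⟩)
        · exact Or.inr ⟨p', hmem, q, hq, hP, rfl⟩

theorem pvRep_mem (end_ : Int) (powers : PySem.Set Int) (y : Int) :
    (y ∈ pvRep end_ powers ↔
      y ∈ powers ∨ ∃ p ∈ powers, ∃ q ∈ powers, 2 ≤ q ∧ p + q < end_ ∧ y = p + q) := by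
  unfold pvRep
  rw [pvRep_mem_aux]
  rw [PySem.Set.mem_ofList]
  simp only [and_assoc]

theorem pvFold_count (end_ : Int) (rep : List Int) :
    ∀ (f : Nat) (i : Int), f = (end_ - i).toNat → ∀ (c : Int),
    (PySem.List.pyRange i end_ 1).foldl (fun c v => if v ∈ rep then c + 1 else c) c =
      c + pvM rep i f := by
  intro f
  induction f with
  | zero =>
    intro i hf c
    have : PySem.List.pyRange i end_ 1 = [] := by
      rw [PySem.List.pyRange_one]
      have : (end_ - i).toNat = 0 := hf.symm
      rw [this]; rfl
    rw [this]; simp only [List.foldl_nil, pvM]; ring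
  | succ f ih =>
    intro i hf c
    have hlt : i < end_ := by omega
    rw [PySem.List.pyRange_one_cons hlt, List.foldl_cons]
    rw [ih (i + 1) (by omega) _]
    rw [pvM]
    by_cases hm : i ∈ rep
    · rw [if_pos hm, if_pos hm]; ring
    · rw [if_neg hm, if_neg hm]; ring

-- ---- pointwise agreement and assembly ----

theorem pvS_one_le (end_ m : Int) (h : pvS end_ m) : 1 ≤ m := by
  rcases h with rfl | ⟨c, e, hc, he, rfl, _⟩
  · exact le_refl 1
  · exact one_le_pow₀ (by omega)

theorem pv_c_lt (end_ c : Int) (e : Nat) (hdom : end_ ≤ 2147483648)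
    (hc : 2 ≤ c) (he : 2 ≤ e) (hlt : c ^ e < end_) :
    c < min end_ 46342 ∧ (e : Nat) < 32 := by
  have hcc : c * c ≤ c ^ e := by
    calc c * c = c ^ 2 := (sq c).symm
    _ ≤ c ^ e := pow_le_pow_right₀ (by omega) he
  have hce : c < end_ := by nlinarith
  have hc46 : c < 46342 := by nlinarith
  refine ⟨lt_min hce hc46, ?_⟩
  by_contra h32
  have h2e : (2 : Int) ^ e ≤ c ^ e := pow_le_pow_left₀ (by omega) hc e
  have h232 : (2 : Int) ^ 32 ≤ 2 ^ e := pow_le_pow_right₀ (by omega) (by omega)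
  have : (2 : Int) ^ 32 = 4294967296 := by norm_num
  omega

theorem pvPointwise_nonneg (end_ : Int) (h1 : 1 ≤ end_) (rep : List Int)
    (hrep : ∀ y, y ∈ rep ↔ pvS end_ y ∨ ∃ p, pvS end_ p ∧ ∃ q, pvS end_ q ∧ 2 ≤ q ∧ p + q < end_ ∧ y = p + q)
    (v : Int) (hv0 : 0 ≤ v) (hv2 : v < end_) :
    (pvQb (pvArr end_) v = true ↔ v ∈ rep) := by
  have harr := pvAget_arr end_ h1
  have hvchar : pvAget (pvArr end_) v = true ↔ pvS end_ v := by
    have := harr v (by omega) hv2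
    rwa [if_neg (by omega)] at this
  have htchar : ∀ t : Int, 0 ≤ t → t < v - 1 →
      ((pvAget (pvArr end_) t && pvAget (pvArr end_) (v - t)) = true ↔
        (pvS end_ t ∧ pvS end_ (v - t))) := by
    intro t ht1 ht2
    rw [Bool.and_eq_true]
    have e1 := harr t (by omega) (by omega)
    have e2 := harr (v - t) (by omega) (by omega)
    rw [if_neg (by omega)] at e1
    rw [if_neg (by omega)] at e2
    rw [e1, e2]
  unfold pvQb
  rw [Bool.or_eq_true, List.any_eq_true, hrep v, hvchar]
  constructor
  · rintro (hS | ⟨t, htm, htt⟩)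
    · exact Or.inl hS
    · rw [PySem.List.mem_pyRange_one] at htm
      obtain ⟨hS1, hS2⟩ := (htchar t htm.1 (by omega)).mp htt
      refine Or.inr ⟨t, hS1, v - t, hS2, ?_, by omega, by ring⟩
      omega
  · rintro (hS | ⟨p, hp, q, hq, h2q, hsum, rfl⟩)
    · exact Or.inl hS
    · right
      have h1p := pvS_one_le end_ p hp
      refine ⟨p, ?_, ?_⟩
      · rw [PySem.List.mem_pyRange_one]
        exact ⟨by omega, by omega⟩
      · apply (htchar p (by omega) (by omega)).mpr
        refine ⟨hp, ?_⟩
        rw [show p + q - p = q from by ring]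
        exact hq

theorem pvRep_not_mem_neg (end_ : Int) (rep : List Int)
    (hrep : ∀ y, y ∈ rep ↔ pvS end_ y ∨ ∃ p, pvS end_ p ∧ ∃ q, pvS end_ q ∧ 2 ≤ q ∧ p + q < end_ ∧ y = p + q)
    (v : Int) (hv : v < 1) : v ∉ rep := by
  intro hm
  rcases (hrep v).mp hm with hS | ⟨p, hp, q, hq, h2q, _, hvpq⟩
  · have := pvS_one_le end_ v hS; omega
  · have h1p := pvS_one_le end_ p hp
    have h1q := pvS_one_le end_ q hq
    omega

theorem pvN_ge_pvM (a : Array Bool) (rep : List Int) :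
    ∀ (f : Nat) (i : Int), (∀ v : Int, i ≤ v → v < i + (f : Int) → v ∈ rep → pvQb a v = true) →
    pvM rep i f ≤ pvN a i f := by
  intro f
  induction f with
  | zero => intro i _; exact le_refl 0
  | succ f ih =>
    intro i h
    rw [pvN, pvM]
    have htail : pvM rep (i + 1) f ≤ pvN a (i + 1) f := by
      apply ih
      intro v hv1 hv2 hm
      exact h v (by omega) (by push_cast at hv2 ⊢; omega) hm
    by_cases hm : i ∈ rep
    · rw [if_pos hm, if_pos (h i le_rfl (by push_cast; omega) hm)]
      omega
    · rw [if_neg hm]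
      have : (0 : Int) ≤ if pvQb a i = true then 1 else 0 := by split <;> omega
      omega

theorem pvN_gt_pvM (a : Array Bool) (rep : List Int) :
    ∀ (f : Nat) (i : Int), (∀ v : Int, i ≤ v → v < i + (f : Int) → v ∈ rep → pvQb a v = true) →
    ∀ v0 : Int, i ≤ v0 → v0 < i + (f : Int) → pvQb a v0 = true → v0 ∉ rep →
    pvM rep i f < pvN a i f := by
  intro f
  induction f with
  | zero =>
    intro i _ v0 h1 h2 _ _
    exfalso; push_cast at h2; omega
  | succ f ih =>
    intro i h v0 hv01 hv02 hq0 hm0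
    rw [pvN, pvM]
    have hh : ∀ v : Int, i + 1 ≤ v → v < i + 1 + (f : Int) → v ∈ rep → pvQb a v = true := by
      intro v hv1 hv2 hm
      exact h v (by omega) (by push_cast at hv2 ⊢; omega) hm
    by_cases hvi : v0 = i
    · subst hvi
      rw [if_pos hq0, if_neg hm0]
      have := pvN_ge_pvM a rep f (v0 + 1) hh
      omega
    · have htail : pvM rep (i + 1) f < pvN a (i + 1) f :=
        ih (i + 1) hh v0 (by omega) (by push_cast at hv02 ⊢; omega) hq0 hm0
      have hhead : (if i ∈ rep then (1 : Int) else 0) ≤ if pvQb a i = true then 1 else 0 := by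
        by_cases hm : i ∈ rep
        · rw [if_pos hm, if_pos (h i le_rfl (by push_cast; omega) hm)]
        · rw [if_neg hm]; split <;> omega
      omega

theorem pvPointwise (start end_ : Int) (h1 : 1 ≤ end_) (hdom : end_ ≤ 2147483648)
    (hlo : -(end_ + 1) ≤ start) (hnd : ¬ D_count_power_numbers start end_)
    (rep : List Int)
    (hrep : ∀ y, y ∈ rep ↔ pvS end_ y ∨ ∃ p, pvS end_ p ∧ ∃ q, pvS end_ q ∧ 2 ≤ q ∧ p + q < end_ ∧ y = p + q)
    (v : Int) (hv1 : start ≤ v) (hv2 : v < end_) :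
    (pvQb (pvArr end_) v = true ↔ v ∈ rep) := by
  have harr := pvAget_arr end_ h1
  by_cases hv0 : v < 0
  · have hfalse : ¬ pvS end_ (end_ + 1 + v) := by
      intro hS
      apply hnd
      rcases hS with h1m | ⟨c, e, hc, he, hce, hlt⟩
      · exact ⟨h1, hlo, by omega, Or.inl (by omega)⟩
      · obtain ⟨hcmin, he32⟩ := pv_c_lt end_ c e hdom hc he (by rw [hce]; omega)
        refine ⟨h1, hlo, by omega, Or.inr ?_⟩
        refine ⟨c, ?_, e, List.mem_range.mpr he32, he, by rw [hce]; omega, by rw [hce]; omega⟩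
        rw [PySem.List.mem_pyRange_one]
        exact ⟨hc, hcmin⟩
    have hQ : pvQb (pvArr end_) v = false := by
      unfold pvQb
      have h1b : pvAget (pvArr end_) v = false := by
        by_cases hb : pvAget (pvArr end_) v = true
        · exfalso
          have := (harr v (by omega) hv2).mp hb
          rw [if_pos hv0] at this
          exact hfalse this
        · simpa using hb
      rw [h1b]
      have hemp : PySem.List.pyRange 0 (v - 1) 1 = [] := by
        rw [PySem.List.pyRange_one, show (v - 1 - 0).toNat = 0 from by omega]
        rfl
      rw [hemp]
      rfl
    have hrepv : v ∉ rep := pvRep_not_mem_neg end_ rep hrep v (by omega)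
    rw [hQ]
    simp [hrepv]
  · exact pvPointwise_nonneg end_ h1 rep hrep v (by omega) hv2

theorem pvN_eq_pvM (a : Array Bool) (rep : List Int) :
    ∀ (f : Nat) (i : Int), (∀ v : Int, i ≤ v → v < i + (f : Int) → (pvQb a v = true ↔ v ∈ rep)) →
    pvN a i f = pvM rep i f := by
  intro f
  induction f with
  | zero => intro i _; rfl
  | succ f ih =>
    intro i h
    rw [pvN, pvM]
    have h0 : pvQb a i = true ↔ i ∈ rep := h i le_rfl (by push_cast; omega)
    have h1 : pvN a (i + 1) f = pvM rep (i + 1) f := by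
      apply ih
      intro v hv1 hv2
      exact h v (by omega) (by push_cast at hv2 ⊢; omega)
    rw [h1]
    congr 1
    by_cases hq : pvQb a i = true
    · rw [if_pos hq, if_pos (h0.mp hq)]
    · rw [if_neg hq, if_neg (fun hm => hq (h0.mpr hm))]

-- ===== VERDICT (by name: the statement is the Claim_ definition above) =====
theorem count_power_numbers_spec : Claim_unchanged_count_power_numbers := by
  intro start end_ hdom hpre hnd
  obtain ⟨h1, hlo⟩ := hpre
  have hdom2 : end_ ≤ 2147483648 := by
    unfold Dom_count_power_numbers pvDomInt at hdom; simp at hdom; omega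
  show count_power_numbers start end_ = count_power_numbers_alt start end_
  have hA : count_power_numbers start end_ = pvN (pvArr end_) start (end_ - start).toNat := by
    show pvCount (pvArr end_) start [] 0 (end_ - start).toNat = _
    rw [pvCount_eq_pvN (pvArr end_) _ start [] 0 (by simp)]
    simp
  set rep := pvRep end_ (pvPowers end_ 2 (PySem.Set.ofList [1]) end_.toNat) with hrepdef
  have hB : count_power_numbers_alt start end_ = pvM rep start (end_ - start).toNat := by
    show (PySem.List.pyRange start end_ 1).foldl _ 0 = _
    rw [pvFold_count end_ rep (end_ - start).toNat start rfl 0]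
    simp
  have hrep : ∀ y, y ∈ rep ↔ pvS end_ y ∨ ∃ p, pvS end_ p ∧ ∃ q, pvS end_ q ∧ 2 ≤ q ∧ p + q < end_ ∧ y = p + q := by
    intro y
    rw [hrepdef, pvRep_mem]
    constructor
    · rintro (h | ⟨p, hp, q, hq, h2, hs, he⟩)
      · exact Or.inl ((pvPowers_char end_ h1 y).mp h)
      · exact Or.inr ⟨p, (pvPowers_char end_ h1 p).mp hp, q, (pvPowers_char end_ h1 q).mp hq, h2, hs, he⟩
    · rintro (h | ⟨p, hp, q, hq, h2, hs, he⟩)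
      · exact Or.inl ((pvPowers_char end_ h1 y).mpr h)
      · exact Or.inr ⟨p, (pvPowers_char end_ h1 p).mpr hp, q, (pvPowers_char end_ h1 q).mpr hq, h2, hs, he⟩
  rw [hA, hB]
  apply pvN_eq_pvM
  intro v hv1 hv2
  exact pvPointwise start end_ h1 hdom2 hlo hnd rep hrep v hv1 (by omega)

set_option maxRecDepth 40000 in
theorem count_power_numbers_changed : Claim_changed_count_power_numbers := by
  unfold Claim_changed_count_power_numbers; decide

theorem count_power_numbers_tight : Claim_exact_count_power_numbers := by
  intro start end_ hdom hpre hd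
  obtain ⟨h1, hlo⟩ := hpre
  obtain ⟨_, _, hneg, hdisj⟩ := hd
  have hA : count_power_numbers start end_ = pvN (pvArr end_) start (end_ - start).toNat := by
    show pvCount (pvArr end_) start [] 0 (end_ - start).toNat = _
    rw [pvCount_eq_pvN (pvArr end_) _ start [] 0 (by simp)]
    simp
  set rep := pvRep end_ (pvPowers end_ 2 (PySem.Set.ofList [1]) end_.toNat) with hrepdef
  have hB : count_power_numbers_alt start end_ = pvM rep start (end_ - start).toNat := by
    show (PySem.List.pyRange start end_ 1).foldl _ 0 = _
    rw [pvFold_count end_ rep (end_ - start).toNat start rfl 0]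
    simp
  have hrep : ∀ y, y ∈ rep ↔ pvS end_ y ∨ ∃ p, pvS end_ p ∧ ∃ q, pvS end_ q ∧ 2 ≤ q ∧ p + q < end_ ∧ y = p + q := by
    intro y
    rw [hrepdef, pvRep_mem]
    constructor
    · rintro (h | ⟨p, hp, q, hq, h2, hs, he⟩)
      · exact Or.inl ((pvPowers_char end_ h1 y).mp h)
      · exact Or.inr ⟨p, (pvPowers_char end_ h1 p).mp hp, q, (pvPowers_char end_ h1 q).mp hq, h2, hs, he⟩
    · rintro (h | ⟨p, hp, q, hq, h2, hs, he⟩)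
      · exact Or.inl ((pvPowers_char end_ h1 y).mpr h)
      · exact Or.inr ⟨p, (pvPowers_char end_ h1 p).mpr hp, q, (pvPowers_char end_ h1 q).mpr hq, h2, hs, he⟩
  have hmono : ∀ v : Int, start ≤ v → v < start + ((end_ - start).toNat : Int) →
      v ∈ rep → pvQb (pvArr end_) v = true := by
    intro v _ hv2 hm
    by_cases hv0 : v < 0
    · exact absurd hm (pvRep_not_mem_neg end_ rep hrep v (by omega))
    · exact (pvPointwise_nonneg end_ h1 rep hrep v (by omega) (by omega)).mpr hm
  -- a witness index v0 ∈ [start, -1] whose wrapped cell holds a power number (or 1)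
  obtain ⟨v0, hv0s, hv0n, hv0S⟩ :
      ∃ v0 : Int, start ≤ v0 ∧ v0 < 0 ∧ pvS end_ (end_ + 1 + v0) := by
    rcases hdisj with hle1 | ⟨c, hcm, e, hem, he2, hge, hlt⟩
    · exact ⟨-end_, by omega, by omega, by rw [show end_ + 1 + -end_ = 1 from by ring]; exact Or.inl rfl⟩
    · rw [PySem.List.mem_pyRange_one] at hcm
      refine ⟨c ^ e - (end_ + 1), by omega, by omega, ?_⟩
      rw [show end_ + 1 + (c ^ e - (end_ + 1)) = c ^ e from by ring]
      exact Or.inr ⟨c, e, hcm.1, he2, rfl, hlt⟩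
  have hq0 : pvQb (pvArr end_) v0 = true := by
    unfold pvQb
    have := (pvAget_arr end_ h1 v0 (by omega) (by omega)).mpr (by rw [if_pos hv0n]; exact hv0S)
    rw [this]
    rfl
  have hm0 : v0 ∉ rep := pvRep_not_mem_neg end_ rep hrep v0 (by omega)
  have hlt : pvM rep start (end_ - start).toNat < pvN (pvArr end_) start (end_ - start).toNat := by
    apply pvN_gt_pvM (pvArr end_) rep (end_ - start).toNat start hmono v0 hv0s (by omega) hq0 hm0
  rw [hA, hB]
  omega
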